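-- pv_equiv track=rewrite | github.com/vlad-bezden/py.checkio | electronic_station/numbers_factory.py | parse
-- ===== SOURCE A (Python) =====
-- from typing import List
--
-- def parse(number: int) -> List[int]:
--     if number < 10:
--         return [number]
--     divisors = []
--     for i in range(9, 1, -1):
--         divisor, reminder = divmod(number, i)
--         if reminder == 0:
--             divisors.append(i)
--             divisors.extend(parse(divisor))
--             break
--     else:
--         divisors.append(number)
--     return divisors
-- ===== SOURCE B (Python) =====
-- from typing import List
--
--
-- def parse(number: int) -> List[int]:
--     # Iterative version: explicit loop with an accumulator instead of recursion.
--     result = []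
--     while number >= 10:
--         for i in range(9, 1, -1):
--             if number % i == 0:
--                 result.append(i)
--                 number //= i
--                 break
--         else:
--             result.append(number)
--             return result
--     result.append(number)
--     return result
-- ===== Notes on version B (the rewrite author's own statement) =====
-- stated objective: alternative
-- what changed: Replaced the recursive greedy factorisation (recursion building [i] ++ parse(number//i)) with an explicit while loop that maintains an accumulator list and reassigns number, using for/else for the no-divisor fallback.
import Mathlib
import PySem

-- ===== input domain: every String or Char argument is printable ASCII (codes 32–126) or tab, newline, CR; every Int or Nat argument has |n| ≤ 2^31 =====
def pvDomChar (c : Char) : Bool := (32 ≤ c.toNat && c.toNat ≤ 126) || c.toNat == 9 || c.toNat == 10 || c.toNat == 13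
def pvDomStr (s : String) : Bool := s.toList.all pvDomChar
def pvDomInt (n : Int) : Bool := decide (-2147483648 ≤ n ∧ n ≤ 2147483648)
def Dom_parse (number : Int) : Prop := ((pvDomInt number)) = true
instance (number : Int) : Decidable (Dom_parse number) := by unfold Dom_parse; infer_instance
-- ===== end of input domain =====

-- B is the same greedy factorisation written as an explicit accumulator loop instead of recursion; return values proved equal.

-- ===== PORT A =====
-- A's for-loop over range(9,1,-1) with divmod and break/else: scan the list of
-- candidates, returning the first (i, number // i) with number % i == 0.
-- divmod(number, i) with i ≠ 0 is exactly (PySem.Int.floordiv, PySem.Int.mod).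
def parseScan (number : Int) : List Int → Option (Int × Int)
  | [] => none
  | i :: rest =>
      let d := PySem.Int.floordiv number i
      let r := PySem.Int.mod number i
      if r = 0 then some (i, d) else parseScan number rest

-- fact the port's termination proof cites: a hit of the scan is a member of the
-- candidate list and the stored quotient is number // i
theorem parseScan_some {number i d : Int} {L : List Int}
    (h : parseScan number L = some (i, d)) :
    i ∈ L ∧ d = PySem.Int.floordiv number i := by
  induction L with
  | nil => simp [parseScan] at h
  | cons j rest ih =>
    simp only [parseScan] at h
    split at h
    · simp only [Option.some.injEq, Prod.mk.injEq] at h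
      obtain ⟨rfl, rfl⟩ := h
      exact ⟨List.mem_cons_self, rfl⟩
    · obtain ⟨hm, hd⟩ := ih h
      exact ⟨List.mem_cons_of_mem _ hm, hd⟩

-- quotient shrinks: cited by both ports' termination proofs
theorem floordiv_shrink {number i : Int} (h10 : 10 ≤ number) (h2 : 2 ≤ i) :
    (PySem.Int.floordiv number i).toNat < number.toNat := by
  have hlt : PySem.Int.floordiv number i < number :=
    (PySem.Int.floordiv_lt_iff_lt_mul (by omega)).mpr (by nlinarith)
  have hnn : (0:Int) ≤ PySem.Int.floordiv number i :=
    (PySem.Int.le_floordiv_iff_mul_le (by omega)).mpr (by omega)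
  omega

def parse (number : Int) : List Int :=
  if number < 10 then [number]
  else
    match h : parseScan number [9, 8, 7, 6, 5, 4, 3, 2] with
    | some (i, d) => i :: parse d
    | none => [number]
termination_by number.toNat
decreasing_by
  obtain ⟨hi, hd⟩ := parseScan_some h
  have h2 : 2 ≤ i := by simp at hi; omega
  subst hd
  exact floordiv_shrink (by omega) h2

-- ===== PORT B =====
-- B's inner for/else: first i in [9..2] with number % i == 0
def parseAltFind (number : Int) : Option Int :=
  [9, 8, 7, 6, 5, 4, 3, 2].find? (fun i => PySem.Int.mod number i == 0)

-- B's while loop: result accumulator, reassigned number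
def parseAltGo (number : Int) (result : List Int) : List Int :=
  if 10 ≤ number then
    match h : parseAltFind number with
    | some i => parseAltGo (PySem.Int.floordiv number i) (result ++ [i])
    | none => result ++ [number]
  else result ++ [number]
termination_by number.toNat
decreasing_by
  have hi : i ∈ [(9:Int), 8, 7, 6, 5, 4, 3, 2] := List.mem_of_find?_eq_some h
  have h2 : 2 ≤ i := by simp at hi; omega
  exact floordiv_shrink (by omega) h2

def parse_alt (number : Int) : List Int := parseAltGo number []

-- ===== PRECONDITION & SPEC =====
def Spec_parse (number : Int) (out : List Int) : Prop := out = parse_alt number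
instance (number : Int) (out : List Int) : Decidable (Spec_parse number out) := by unfold Spec_parse; infer_instance

-- ===== CLAIM (what is proved, stated in full; the proofs are below) =====
def Claim_equal_parse : Prop := ∀ (number : Int), Dom_parse number → Spec_parse number (parse number)

-- ===== LEMMAS AND PROOFS =====

-- A's scan and B's find? agree: the scan is find? paired with the quotient
theorem parseScan_eq_find (number : Int) (L : List Int) :
    parseScan number L =
      (L.find? (fun i => PySem.Int.mod number i == 0)).map
        (fun i => (i, PySem.Int.floordiv number i)) := by
  induction L with
  | nil => simp [parseScan]
  | cons j rest ih =>
    simp only [parseScan, List.find?]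
    split <;> rename_i hr
    · simp [hr]
    · have : (PySem.Int.mod number j == 0) = false := by
        simp; intro hc; exact hr hc
      simp [this, ih]

-- the loop with accumulator computes the accumulator followed by A's result
theorem parseAltGo_eq : ∀ (n : Nat) (number : Int), number.toNat ≤ n →
    ∀ (result : List Int), parseAltGo number result = result ++ parse number := by
  intro n
  induction n with
  | zero =>
    intro number hle result
    have hlt : number < 10 := by omega
    have h10 : ¬ (10 ≤ number) := by omega
    rw [parseAltGo, parse]
    simp [hlt, h10]
  | succ n ih =>
    intro number hle result
    rw [parseAltGo, parse]
    by_cases h10 : 10 ≤ number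
    · have hnlt : ¬ number < 10 := by omega
      simp only [h10, if_true, hnlt, if_false]
      rw [parseScan_eq_find]
      split <;> rename_i hf
      · -- the loop found a divisor i
        rename_i i
        rw [parseAltFind] at hf
        have h2 : 2 ≤ i := by
          have hi : i ∈ [(9:Int), 8, 7, 6, 5, 4, 3, 2] := List.mem_of_find?_eq_some hf
          simp at hi; omega
        have hsh := floordiv_shrink h10 h2
        split <;> rename_i heq
        · rename_i j d
          rw [hf] at heq
          simp only [Option.map_some, Option.some.injEq, Prod.mk.injEq] at heq
          obtain ⟨h1, h2'⟩ := heq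
          subst h1
          subst h2'
          rw [ih (PySem.Int.floordiv number i) (by omega) (result ++ [i])]
          simp
        · rw [hf] at heq
          simp at heq
      · -- no single-digit divisor
        rw [parseAltFind] at hf
        split <;> rename_i heq
        · rw [hf] at heq; simp at heq
        · rfl
    · have hlt : number < 10 := by omega
      simp [h10, hlt]

-- ===== VERDICT (by name: the statement is the Claim_ definition above) =====
theorem parse_spec : Claim_equal_parse := by
  intro number _
  unfold Spec_parse parse_alt
  exact (parseAltGo_eq number.toNat number le_rfl []).symm
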